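-- pv_equiv track=rewrite | github.com/hguilloteau/python | exercice_9.1.py | sansDC
-- ===== SOURCE A (Python) =====
-- def sansDC(ligne):
--     "Fonction qui renvoie la chaine de caractère amputé du dernier caractère"
--     i = 0
--     j = len(ligne)-1
--     newligne = ""
--     while i < j:
--         newligne = newligne + ligne[i]
--         i = i + 1
--     return newligne
-- ===== SOURCE B (Python) =====
-- def sansDC(ligne):
--     "Fonction qui renvoie la chaine de caractère amputé du dernier caractère"
--     return ligne[:-1]
-- ===== Notes on version B (the rewrite author's own statement) =====
-- stated objective: idiomatic
-- what changed: Replaces the index-driven while loop that concatenates characters one by one with the single closed-form slice ligne[:-1].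
import Mathlib
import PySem

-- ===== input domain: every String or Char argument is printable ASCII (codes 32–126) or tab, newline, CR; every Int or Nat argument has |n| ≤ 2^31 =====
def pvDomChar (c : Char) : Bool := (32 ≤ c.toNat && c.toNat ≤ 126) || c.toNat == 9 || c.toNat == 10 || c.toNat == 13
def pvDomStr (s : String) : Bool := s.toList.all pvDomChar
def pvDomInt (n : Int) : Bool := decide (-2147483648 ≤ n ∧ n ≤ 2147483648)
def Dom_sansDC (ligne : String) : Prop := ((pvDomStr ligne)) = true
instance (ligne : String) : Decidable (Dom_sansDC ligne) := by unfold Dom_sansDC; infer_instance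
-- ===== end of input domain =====

-- B replaces A's character-by-character index loop with the closed-form slice ligne[:-1] (idiomatic).

-- ===== PORT A =====
-- the while loop: while i < j: newligne = newligne + ligne[i]; i = i + 1
def sansDCgo (s : List Char) (j : Int) (i : Int) (acc : List Char) : List Char :=
  if _h : i < j then
    sansDCgo s j (i + 1) (acc ++ (PySem.List.pyGet? s i).toList)
  else acc
termination_by (j - i).toNat
decreasing_by omega

def sansDC (ligne : String) : String :=
  String.ofList (sansDCgo ligne.toList ((ligne.toList.length : Int) - 1) 0 [])

-- ===== PORT B =====
def sansDC_alt (ligne : String) : String := PySem.Str.slice ligne none (some (-1))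

-- ===== PRECONDITION & SPEC =====
def Spec_sansDC (ligne : String) (out : String) : Prop := out = sansDC_alt ligne
instance (ligne : String) (out : String) : Decidable (Spec_sansDC ligne out) := by unfold Spec_sansDC; infer_instance

-- ===== CLAIM (what is proved, stated in full; the proofs are below) =====
def Claim_equal_sansDC : Prop := ∀ (ligne : String), Dom_sansDC ligne → Spec_sansDC ligne (sansDC ligne)

-- ===== LEMMAS AND PROOFS =====
theorem sansDCgo_eq (s : List Char) (j : Int) (i : Int) (acc : List Char) (hi : 0 ≤ i) :
    sansDCgo s j i acc = acc ++ (List.take (j - i).toNat (List.drop i.toNat s)) := by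
  unfold sansDCgo
  split
  · rename_i h
    rw [sansDCgo_eq s j (i + 1) _ (by omega), PySem.List.pyGet?_of_nonneg s hi]
    have hij : (j - i).toNat = (j - (i + 1)).toNat + 1 := by omega
    have hi1 : (i + 1).toNat = i.toNat + 1 := by omega
    rcases hs : s.drop i.toNat with _ | ⟨c, rest⟩
    · have hlen : s.length ≤ i.toNat := by
        have := congrArg List.length hs; simp at this; omega
      have hd1 : s.drop (i + 1).toNat = [] := List.drop_eq_nil_of_le (by omega)
      simp [List.getElem?_eq_none hlen, hij, hd1]
    · have hget : s[i.toNat]? = some c := by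
        have h0 : (s.drop i.toNat)[0]? = some c := by rw [hs]; rfl
        simpa using h0
      have hd1 : s.drop (i + 1).toNat = rest := by
        have := congrArg (List.drop 1) hs
        simpa [hi1, List.drop_drop, Nat.add_comm] using this
      rw [hget, hij, hi1 ]
      simp [List.take_succ_cons, ← hi1, hd1]
  · rename_i h
    have : (j - i).toNat = 0 := by omega
    simp [this]
termination_by (j - i).toNat
decreasing_by omega

theorem sansDC_spec : Claim_equal_sansDC := by
  intro ligne _
  unfold Spec_sansDC sansDC sansDC_alt
  apply String.toList_injective
  rw [PySem.Str.toList_slice]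
  rw [sansDCgo_eq _ _ _ _ le_rfl]
  simp [PySem.Chars.slice_eq_listSlice, PySem.List.slice_to_neg_one, List.dropLast_eq_take]
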